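-- pv_equiv track=rewrite | github.com/pypi-data/pypi-mirror-250 | packages/physicalquantity/physicalquantity-0.1.1.tar.gz/physicalquantity-0.1.1/physicalquantity/__init__.py | _find_si_name
-- ===== SOURCE A (Python) =====
-- _ISO_UNITS = {
--   "one":       {},
--   "metre":     {"dimensions": {"length": 1}},
--   "kg":        {"dimensions": {"mass": 1}},
--   "second":    {"dimensions": {"time": 1}},
--   "ampere":    {"dimensions": {"current": 1}},
--   "kelvin":    {"dimensions": {"temperature": 1}},
--   "mole":      {"dimensions": {"substance": 1}},
--   "candela":   {"dimensions": {"intensity": 1}},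
--   "hertz":     {"dimensions": {"time": -1}},
--   "newton":    {"dimensions": {"length": 1, "mass": 1, "time": -2}},
--   "pascal":    {"dimensions": {"length": -1, "mass": 1, "time": -2}},
--   "joule":     {"dimensions": {"length": 2, "mass": 1, "time": -2}},
--   "watt":      {"dimensions": {"length": 2, "mass": 1, "time": -3}},
--   "coulomb":   {"dimensions": {"current": 1, "time": 1}},
--   "volt":      {"dimensions": {"length": 2, "mass": 1, "time": -3, "current": -1}},
--   "ohm":       {"dimensions": {"length": 2, "mass": 1, "time": -3, "current": -2}},
--   "siemens":   {"dimensions": {"length": -2, "mass": -1, "time": 3, "current": 2}},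
--   "farad":     {"dimensions": {"length": -2, "mass": -1, "time": 4, "current": 2}},
--   "tesla":     {"dimensions": {"mass": 1, "time": -2, "current": -1}},
--   "weber":     {"dimensions": {"length": 2, "mass": 1, "time": -2, "current": -1}},
--   "henry":     {"dimensions": {"length": 2, "mass": 1, "time": -2, "current": -2}},
--   "lux":       {"dimensions": {"intensity": 1, "length": -2}},
--   "grey":      {"dimensions": {"length": 2, "time": -2}},
--   "m2":        {"dimensions": {"length": 2}},
--   "m3":        {"dimensions": {"length": 3}},
-- }
--
-- def _find_si_name(dimarr):
--     for key, val in _ISO_UNITS.items():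
--         dimension_array = []
--         dimensions = val.get("dimensions",{})
--         for dimension in ["length",
--                           "mass",
--                           "time",
--                           "current",
--                           "temperature",
--                           "substance",
--                           "intensity"]:
--             if dimension in dimensions:
--                 dimension_array.append(dimensions[dimension])
--             else:
--                 dimension_array.append(0)
--         if dimarr == dimension_array:
--             return key
--     return None
-- ===== SOURCE B (Python) =====
-- # Precomputed reverse table: dimension 7-vector -> SI unit name.
-- # All 25 vectors are distinct, so a direct lookup agrees with the original
-- # first-match scan over _ISO_UNITS.
-- _SI_BY_VECTOR = {
--     (0, 0, 0, 0, 0, 0, 0):  "one",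
--     (1, 0, 0, 0, 0, 0, 0):  "metre",
--     (0, 1, 0, 0, 0, 0, 0):  "kg",
--     (0, 0, 1, 0, 0, 0, 0):  "second",
--     (0, 0, 0, 1, 0, 0, 0):  "ampere",
--     (0, 0, 0, 0, 1, 0, 0):  "kelvin",
--     (0, 0, 0, 0, 0, 1, 0):  "mole",
--     (0, 0, 0, 0, 0, 0, 1):  "candela",
--     (0, 0, -1, 0, 0, 0, 0): "hertz",
--     (1, 1, -2, 0, 0, 0, 0): "newton",
--     (-1, 1, -2, 0, 0, 0, 0): "pascal",
--     (2, 1, -2, 0, 0, 0, 0): "joule",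
--     (2, 1, -3, 0, 0, 0, 0): "watt",
--     (0, 0, 1, 1, 0, 0, 0):  "coulomb",
--     (2, 1, -3, -1, 0, 0, 0): "volt",
--     (2, 1, -3, -2, 0, 0, 0): "ohm",
--     (-2, -1, 3, 2, 0, 0, 0): "siemens",
--     (-2, -1, 4, 2, 0, 0, 0): "farad",
--     (0, 1, -2, -1, 0, 0, 0): "tesla",
--     (2, 1, -2, -1, 0, 0, 0): "weber",
--     (2, 1, -2, -2, 0, 0, 0): "henry",
--     (-2, 0, 0, 0, 0, 0, 1): "lux",
--     (2, 0, -2, 0, 0, 0, 0): "grey",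
--     (2, 0, 0, 0, 0, 0, 0):  "m2",
--     (3, 0, 0, 0, 0, 0, 0):  "m3",
-- }
--
-- def _find_si_name(dimarr):
--     return _SI_BY_VECTOR.get(tuple(dimarr))
-- ===== Notes on version B (the rewrite author's own statement) =====
-- stated objective: simpler
-- what changed: Replaces the per-call scan that rebuilds each unit's 7-element dimension array from the nested _ISO_UNITS dicts with a flat precomputed reverse table (dimension vector -> name) and a single dict lookup; all 25 vectors are distinct so first-match order is irrelevant.
import Mathlib
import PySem

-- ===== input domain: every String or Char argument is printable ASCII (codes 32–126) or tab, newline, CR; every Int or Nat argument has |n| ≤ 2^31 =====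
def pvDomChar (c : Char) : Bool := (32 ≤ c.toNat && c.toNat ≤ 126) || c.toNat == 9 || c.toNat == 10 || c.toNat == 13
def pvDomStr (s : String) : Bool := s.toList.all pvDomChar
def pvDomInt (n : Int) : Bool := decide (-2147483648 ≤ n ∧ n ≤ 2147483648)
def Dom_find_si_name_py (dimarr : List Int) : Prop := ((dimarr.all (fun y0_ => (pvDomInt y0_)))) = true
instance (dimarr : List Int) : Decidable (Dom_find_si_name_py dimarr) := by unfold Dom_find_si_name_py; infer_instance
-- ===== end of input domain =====

-- B replaces A's per-call scan over the nested unit dicts with a flat precomputed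
-- reverse table (dimension vector -> name) and a single lookup (objective: simpler).

-- ===== PORT A =====
-- module data of A: _ISO_UNITS (name, {"dimensions": {...}} as a dimensions dict)
def isoUnits : List (String × PySem.Dict String Int) :=
  [ ("one",     PySem.Dict.ofList []),
    ("metre",   PySem.Dict.ofList [("length", 1)]),
    ("kg",      PySem.Dict.ofList [("mass", 1)]),
    ("second",  PySem.Dict.ofList [("time", 1)]),
    ("ampere",  PySem.Dict.ofList [("current", 1)]),
    ("kelvin",  PySem.Dict.ofList [("temperature", 1)]),
    ("mole",    PySem.Dict.ofList [("substance", 1)]),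
    ("candela", PySem.Dict.ofList [("intensity", 1)]),
    ("hertz",   PySem.Dict.ofList [("time", -1)]),
    ("newton",  PySem.Dict.ofList [("length", 1), ("mass", 1), ("time", -2)]),
    ("pascal",  PySem.Dict.ofList [("length", -1), ("mass", 1), ("time", -2)]),
    ("joule",   PySem.Dict.ofList [("length", 2), ("mass", 1), ("time", -2)]),
    ("watt",    PySem.Dict.ofList [("length", 2), ("mass", 1), ("time", -3)]),
    ("coulomb", PySem.Dict.ofList [("current", 1), ("time", 1)]),
    ("volt",    PySem.Dict.ofList [("length", 2), ("mass", 1), ("time", -3), ("current", -1)]),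
    ("ohm",     PySem.Dict.ofList [("length", 2), ("mass", 1), ("time", -3), ("current", -2)]),
    ("siemens", PySem.Dict.ofList [("length", -2), ("mass", -1), ("time", 3), ("current", 2)]),
    ("farad",   PySem.Dict.ofList [("length", -2), ("mass", -1), ("time", 4), ("current", 2)]),
    ("tesla",   PySem.Dict.ofList [("mass", 1), ("time", -2), ("current", -1)]),
    ("weber",   PySem.Dict.ofList [("length", 2), ("mass", 1), ("time", -2), ("current", -1)]),
    ("henry",   PySem.Dict.ofList [("length", 2), ("mass", 1), ("time", -2), ("current", -2)]),
    ("lux",     PySem.Dict.ofList [("intensity", 1), ("length", -2)]),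
    ("grey",    PySem.Dict.ofList [("length", 2), ("time", -2)]),
    ("m2",      PySem.Dict.ofList [("length", 2)]),
    ("m3",      PySem.Dict.ofList [("length", 3)]) ]

-- the seven dimension names A iterates over, in order
def dimNames : List String :=
  ["length", "mass", "time", "current", "temperature", "substance", "intensity"]

-- inner loop of A: build dimension_array by appending dimensions[d] or 0
def dimArrayA (dimensions : PySem.Dict String Int) : List Int :=
  dimNames.foldl
    (fun arr d => arr ++ [if dimensions.contains d then dimensions.getD d 0 else 0]) []

-- outer loop of A: scan _ISO_UNITS.items(), early return on match
def findLoopA : List (String × PySem.Dict String Int) → List Int → Option String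
  | [], _ => none
  | (key, val) :: rest, dimarr =>
      if dimarr = dimArrayA val then some key else findLoopA rest dimarr

def find_si_name_py (dimarr : List Int) : Option String :=
  findLoopA isoUnits dimarr

-- ===== PORT B =====
-- Source B's precomputed literal table _SI_BY_VECTOR (tuple key modelled as List Int)
def siByVector : PySem.Dict (List Int) String :=
  PySem.Dict.ofList
    [ ([0, 0, 0, 0, 0, 0, 0],  "one"),
      ([1, 0, 0, 0, 0, 0, 0],  "metre"),
      ([0, 1, 0, 0, 0, 0, 0],  "kg"),
      ([0, 0, 1, 0, 0, 0, 0],  "second"),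
      ([0, 0, 0, 1, 0, 0, 0],  "ampere"),
      ([0, 0, 0, 0, 1, 0, 0],  "kelvin"),
      ([0, 0, 0, 0, 0, 1, 0],  "mole"),
      ([0, 0, 0, 0, 0, 0, 1],  "candela"),
      ([0, 0, -1, 0, 0, 0, 0], "hertz"),
      ([1, 1, -2, 0, 0, 0, 0], "newton"),
      ([-1, 1, -2, 0, 0, 0, 0], "pascal"),
      ([2, 1, -2, 0, 0, 0, 0], "joule"),
      ([2, 1, -3, 0, 0, 0, 0], "watt"),
      ([0, 0, 1, 1, 0, 0, 0],  "coulomb"),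
      ([2, 1, -3, -1, 0, 0, 0], "volt"),
      ([2, 1, -3, -2, 0, 0, 0], "ohm"),
      ([-2, -1, 3, 2, 0, 0, 0], "siemens"),
      ([-2, -1, 4, 2, 0, 0, 0], "farad"),
      ([0, 1, -2, -1, 0, 0, 0], "tesla"),
      ([2, 1, -2, -1, 0, 0, 0], "weber"),
      ([2, 1, -2, -2, 0, 0, 0], "henry"),
      ([-2, 0, 0, 0, 0, 0, 1], "lux"),
      ([2, 0, -2, 0, 0, 0, 0], "grey"),
      ([2, 0, 0, 0, 0, 0, 0],  "m2"),
      ([3, 0, 0, 0, 0, 0, 0],  "m3") ]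

def find_si_name_py_alt (dimarr : List Int) : Option String :=
  siByVector.get? dimarr

-- ===== PRECONDITION & SPEC =====
def Spec_find_si_name_py (dimarr : List Int) (out : Option String) : Prop := out = find_si_name_py_alt dimarr
instance (dimarr : List Int) (out : Option String) : Decidable (Spec_find_si_name_py dimarr out) := by unfold Spec_find_si_name_py; infer_instance

-- ===== CLAIM (what is proved, stated in full; the proofs are below) =====
def Claim_equal_find_si_name_py : Prop := ∀ (dimarr : List Int), Dom_find_si_name_py dimarr → Spec_find_si_name_py dimarr (find_si_name_py dimarr)

-- ===== LEMMAS AND PROOFS =====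

-- Dict.get? over a literal association list is first-match lookup
theorem get?_mk_eq_lookup (l : List ((List Int) × String)) (x : List Int) :
    (PySem.Dict.mk l).get? x = l.lookup x := by
  induction l with
  | nil => rfl
  | cons p rest ih =>
      obtain ⟨k, v⟩ := p
      rw [PySem.Dict.get?_mk_cons]
      simp only [List.lookup, ih]
      by_cases h : x = k
      · simp [h]
      · rw [show (x == k) = false from beq_eq_false_iff_ne.mpr h]; simp [Ne.symm h]

-- A's scan is a first-match lookup in the (vector, name) table it implicitly builds
theorem findLoopA_eq (l : List (String × PySem.Dict String Int)) (x : List Int) :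
    findLoopA l x = (l.map (fun kv => (dimArrayA kv.2, kv.1))).lookup x := by
  induction l with
  | nil => rfl
  | cons p rest ih =>
      obtain ⟨k, v⟩ := p
      simp only [findLoopA, List.map, List.lookup, ih]
      by_cases h : x = dimArrayA v
      · rw [if_pos h, show (x == dimArrayA v) = true from beq_iff_eq.mpr h]
      · rw [if_neg h, show (x == dimArrayA v) = false from beq_eq_false_iff_ne.mpr h]

-- A's implicit table is exactly B's precomputed literal table (closed computation)
theorem tables_eq :
    siByVector = PySem.Dict.mk (isoUnits.map (fun kv => (dimArrayA kv.2, kv.1))) := by decide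

-- ===== VERDICT (by name: the statement is the Claim_ definition above) =====
theorem find_si_name_py_spec : Claim_equal_find_si_name_py := by
  intro dimarr _
  unfold Spec_find_si_name_py find_si_name_py find_si_name_py_alt
  rw [findLoopA_eq, tables_eq, get?_mk_eq_lookup]
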